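-- pv_equiv track=rewrite | github.com/adambyle/atomic2026 | bots/jacob/oracle_greedy_bot.py | score_nigiri_with_wasabi
-- ===== SOURCE A (Python) =====
-- from collections import Counter
--
-- def score_nigiri_with_wasabi(tableau: list) -> int:
--     """Score nigiri accounting for wasabi, highest nigiri gets wasabi."""
--     c = Counter(tableau)
--     wasabi_left = c["Wasabi"]
--     score = 0
--     for nigiri, base in [("Squid Nigiri", 3), ("Salmon Nigiri", 2), ("Egg Nigiri", 1)]:
--         for _ in range(c[nigiri]):
--             if wasabi_left > 0:
--                 score += base * 3
--                 wasabi_left -= 1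
--             else:
--                 score += base
--     return score
-- ===== SOURCE B (Python) =====
-- def score_nigiri_with_wasabi(tableau: list) -> int:
--     """Score nigiri accounting for wasabi, highest nigiri gets wasabi."""
--     w = tableau.count("Wasabi")
--     sq = tableau.count("Squid Nigiri")
--     sa = tableau.count("Salmon Nigiri")
--     eg = tableau.count("Egg Nigiri")
--     plain = 3 * sq + 2 * sa + eg
--     bonus = 2 * (3 * min(w, sq)
--                  + 2 * min(max(w - sq, 0), sa)
--                  + min(max(w - sq - sa, 0), eg))
--     return plain + bonus
-- ===== Notes on version B (the rewrite author's own statement) =====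
-- stated objective: simpler
-- what changed: Replaced the Counter plus nested per-card greedy loops by a loop-free closed form: four counts and an arithmetic expression (min/max) computing how many of each nigiri get wasabi, highest-first.
import Mathlib
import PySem

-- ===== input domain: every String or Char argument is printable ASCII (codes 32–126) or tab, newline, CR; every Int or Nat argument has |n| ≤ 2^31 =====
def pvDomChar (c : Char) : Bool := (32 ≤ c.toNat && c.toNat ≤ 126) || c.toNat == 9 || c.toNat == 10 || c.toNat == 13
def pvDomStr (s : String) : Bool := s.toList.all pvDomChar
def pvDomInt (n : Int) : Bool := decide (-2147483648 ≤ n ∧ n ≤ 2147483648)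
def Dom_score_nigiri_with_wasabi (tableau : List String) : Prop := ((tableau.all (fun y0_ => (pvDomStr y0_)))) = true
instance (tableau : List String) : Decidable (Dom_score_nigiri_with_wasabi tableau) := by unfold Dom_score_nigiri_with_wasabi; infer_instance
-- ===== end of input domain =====

-- B replaces A's Counter-plus-nested-greedy-loops by a loop-free closed form (objective: simpler).

-- ===== PORT A =====
-- one step of the inner 'for _ in range(c[nigiri])' body: state is (score, wasabi_left)
def pvAStep (base : Int) (st : Int × Int) : Int × Int :=
  if st.2 > 0 then (st.1 + base * 3, st.2 - 1) else (st.1 + base, st.2)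

def score_nigiri_with_wasabi (tableau : List String) : Int :=
  let c := PySem.Dict.counter tableau
  let wasabi_left := c.getD "Wasabi" 0
  let st :=
    [("Squid Nigiri", (3 : Int)), ("Salmon Nigiri", 2), ("Egg Nigiri", 1)].foldl
      (fun st p =>
        (PySem.List.pyRange 0 (c.getD p.1 0) 1).foldl (fun st _ => pvAStep p.2 st) st)
      ((0 : Int), wasabi_left)
  st.1

-- ===== PORT B =====
def score_nigiri_with_wasabi_alt (tableau : List String) : Int :=
  let w : Int := PySem.List.count tableau "Wasabi"
  let sq : Int := PySem.List.count tableau "Squid Nigiri"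
  let sa : Int := PySem.List.count tableau "Salmon Nigiri"
  let eg : Int := PySem.List.count tableau "Egg Nigiri"
  let plain := 3 * sq + 2 * sa + eg
  let bonus := 2 * (3 * min w sq + 2 * min (max (w - sq) 0) sa + min (max (w - sq - sa) 0) eg)
  plain + bonus

-- ===== PRECONDITION & SPEC =====
def Spec_score_nigiri_with_wasabi (tableau : List String) (out : Int) : Prop := out = score_nigiri_with_wasabi_alt tableau
instance (tableau : List String) (out : Int) : Decidable (Spec_score_nigiri_with_wasabi tableau out) := by unfold Spec_score_nigiri_with_wasabi; infer_instance

-- ===== CLAIM (what is proved, stated in full; the proofs are below) =====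
def Claim_equal_score_nigiri_with_wasabi : Prop := ∀ (tableau : List String), Dom_score_nigiri_with_wasabi tableau → Spec_score_nigiri_with_wasabi tableau (score_nigiri_with_wasabi tableau)

-- ===== LEMMAS AND PROOFS =====

-- the inner fold ignores the list elements, so it depends only on the length
theorem pvA_fold_len (b : Int) (l : List Int) (st : Int × Int) :
    l.foldl (fun st _ => pvAStep b st) st = (pvAStep b)^[l.length] st := by
  induction l generalizing st with
  | nil => rfl
  | cons x xs ih => simp [List.foldl_cons, ih, Function.iterate_succ_apply]

-- closed form of iterating the greedy step n times from a nonnegative wasabi count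
theorem pvA_iter (b : Int) (n : Nat) (s w : Int) (hw : 0 ≤ w) :
    (pvAStep b)^[n] (s, w) =
      (s + 3 * b * min w n + b * (n - min w n), w - min w n) := by
  induction n generalizing s w with
  | zero => simp [min_eq_right hw]
  | succ n ih =>
    rw [Function.iterate_succ_apply]
    by_cases h : w > 0
    · rw [show pvAStep b (s, w) = (s + b * 3, w - 1) by simp [pvAStep, h]]
      rw [ih _ _ (by omega)]
      have hm : min w ((n + 1 : Nat) : Int) = min (w - 1) (n : Int) + 1 := by
        push_cast; omega
      rw [hm, Prod.mk.injEq]; constructor <;> (push_cast; ring)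
    · rw [show pvAStep b (s, w) = (s + b, w) by simp [pvAStep, h]]
      rw [ih _ _ hw]
      have hw0 : w = 0 := by omega
      subst hw0
      have h1 : min (0 : Int) ((n : Int)) = 0 := by omega
      have h2 : min (0 : Int) (((n + 1 : Nat) : Int)) = 0 := by push_cast; omega
      rw [h1, h2, Prod.mk.injEq]; exact ⟨by push_cast; ring, rfl⟩

theorem pvRange_len (k : Nat) : (PySem.List.pyRange 0 (k : Int) 1).length = k := by
  rw [PySem.List.length_pyRange_one]; omega

-- ===== VERDICT (by name: the statement is the Claim_ definition above) =====
theorem score_nigiri_with_wasabi_spec : Claim_equal_score_nigiri_with_wasabi := by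
  intro tableau _
  unfold Spec_score_nigiri_with_wasabi score_nigiri_with_wasabi score_nigiri_with_wasabi_alt
  simp only [List.foldl_cons, List.foldl_nil, PySem.Dict.getD_counter, PySem.List.count]
  rw [pvA_fold_len, pvA_fold_len, pvA_fold_len, pvRange_len, pvRange_len, pvRange_len]
  rw [pvA_iter 3 _ _ _ (Int.natCast_nonneg _)]
  rw [pvA_iter 2 _ _ _ (by omega)]
  rw [pvA_iter 1 _ _ _ (by omega)]
  omega
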